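-- pv_equiv track=rewrite | github.com/joshualeeee/joshcauldrons | src/api/bottler.py | create_potions
-- ===== SOURCE A (Python) =====
-- def create_potions(ml, potion_type, result_array, threshold, total):
--     new = 0
--
--     while ml[0] >= threshold[0] and ml[1] >= threshold[1] and ml[2] >= threshold[2] and ml[3] >= threshold[3]:
--         if total < 300:
--             for i in range(4):
--                 ml[i] -= potion_type[i]
--             new += 1
--             total += 1
--         else:
--             break
--
--     if new > 0:
--         result_array.append({
--             "potion_type": potion_type,
--             "quantity": new,
--         })
--     return new
-- ===== SOURCE B (Python) =====
-- def create_potions(ml, potion_type, result_array, threshold, total):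
--     # Closed-form brew count instead of A's step-by-step while loop.
--     if any(ml[i] < threshold[i] for i in range(4)):
--         return 0
--     n = 300 - total
--     for i in range(4):
--         if potion_type[i] > 0:
--             n = min(n, (ml[i] - threshold[i]) // potion_type[i] + 1)
--     if n <= 0:
--         return 0
--     for i in range(4):
--         ml[i] -= n * potion_type[i]
--     result_array.append({"potion_type": potion_type, "quantity": n})
--     return n
-- ===== Notes on version B (the rewrite author's own statement) =====
-- stated objective: simpler
-- what changed: Replaces A's brew-at-a-time while loop with a single closed-form count: the minimum over the capacity 300-total and, for each positive potion_type[i], (ml[i]-threshold[i])//potion_type[i]+1, clamped at 0, applied once to ml.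
-- outside the precondition, e.g. on create_potions([5, 5, 5, 5], [], [], [0, 0, 0, 0], 300): A returns 0, B raises IndexError
import Mathlib
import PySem

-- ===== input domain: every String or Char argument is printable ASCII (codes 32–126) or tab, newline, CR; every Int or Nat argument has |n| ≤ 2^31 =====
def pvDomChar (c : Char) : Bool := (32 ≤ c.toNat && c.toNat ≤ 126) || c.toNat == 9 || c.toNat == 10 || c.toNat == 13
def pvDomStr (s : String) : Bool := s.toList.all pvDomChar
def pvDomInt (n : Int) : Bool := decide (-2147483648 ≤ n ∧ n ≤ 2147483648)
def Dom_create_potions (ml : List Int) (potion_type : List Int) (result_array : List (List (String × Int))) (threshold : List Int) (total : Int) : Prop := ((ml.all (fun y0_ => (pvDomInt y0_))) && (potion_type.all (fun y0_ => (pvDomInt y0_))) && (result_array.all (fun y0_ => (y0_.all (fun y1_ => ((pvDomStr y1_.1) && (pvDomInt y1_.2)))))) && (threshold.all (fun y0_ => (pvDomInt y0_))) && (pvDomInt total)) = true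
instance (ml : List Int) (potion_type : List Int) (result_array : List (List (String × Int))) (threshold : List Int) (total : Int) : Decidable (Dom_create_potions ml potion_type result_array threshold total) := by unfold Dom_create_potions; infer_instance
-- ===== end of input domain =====

-- B replaces A's brew-at-a-time while loop by one closed-form count (capacity and per-ingredient
-- limits), same return value; both Pythons mutate ml/result_array identically, the equivalence
-- proved here is about the RETURN value only.

-- ===== PORT A =====
-- while-loop condition: ml[i] >= threshold[i] for i = 0..3 (indices in range under Pre_)
def pvCondA (ml th : List Int) : Bool :=
  decide (PySem.List.pyGetD th 0 0 ≤ PySem.List.pyGetD ml 0 0) &&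
  decide (PySem.List.pyGetD th 1 0 ≤ PySem.List.pyGetD ml 1 0) &&
  decide (PySem.List.pyGetD th 2 0 ≤ PySem.List.pyGetD ml 2 0) &&
  decide (PySem.List.pyGetD th 3 0 ≤ PySem.List.pyGetD ml 3 0)

-- loop body: for i in range(4): ml[i] -= potion_type[i]
def pvBrewStep (ml pt : List Int) : List Int :=
  (PySem.List.pyRange 0 4 1).foldl
    (fun m i => PySem.List.pySetD m i
      (PySem.List.pyGetD m i 0 - PySem.List.pyGetD pt i 0)) ml

-- the while loop; returns the final `new` (the function's return value)
def pvLoopA (ml pt th : List Int) (new total : Int) : Int :=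
  if pvCondA ml th then
    if total < 300 then
      pvLoopA (pvBrewStep ml pt) pt th (new + 1) (total + 1)
    else new
  else new
termination_by (300 - total).toNat
decreasing_by simp_wf; omega

def create_potions (ml : List Int) (potion_type : List Int) (result_array : List (List (String × Int))) (threshold : List Int) (total : Int) : Int :=
  pvLoopA ml potion_type threshold 0 total

-- ===== PORT B =====
def create_potions_alt (ml : List Int) (potion_type : List Int) (result_array : List (List (String × Int))) (threshold : List Int) (total : Int) : Int :=
  if (PySem.List.pyRange 0 4 1).any (fun i => decide (PySem.List.pyGetD ml i 0 < PySem.List.pyGetD threshold i 0)) then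
    0
  else
    let n := (PySem.List.pyRange 0 4 1).foldl
      (fun l i =>
        if 0 < PySem.List.pyGetD potion_type i 0 then
          min l (PySem.Int.floordiv
                   (PySem.List.pyGetD ml i 0 - PySem.List.pyGetD threshold i 0)
                   (PySem.List.pyGetD potion_type i 0) + 1)
        else l)
      (300 - total)
    if n ≤ 0 then 0 else n

-- ===== PRECONDITION & SPEC =====
-- Pre_ admits the natural four-ingredient domain plus every input whose while-condition fails at
-- an in-range index (there both programs return 0 without touching potion_type); on the remaining
-- short-list inputs A raises IndexError except when total ≥ 300 with a fully satisfied condition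
-- and potion_type shorter than 4, where A returns 0 but B's own limit pass raises IndexError.
def Pre_create_potions (ml : List Int) (potion_type : List Int) (result_array : List (List (String × Int))) (threshold : List Int) (total : Int) : Prop :=
  (4 ≤ ml.length ∧ 4 ≤ potion_type.length ∧ 4 ≤ threshold.length) ∨
  (∃ i ∈ ([0, 1, 2, 3] : List Nat), i < ml.length ∧ i < threshold.length ∧
    ml.getD i 0 < threshold.getD i 0)
instance (ml : List Int) (potion_type : List Int) (result_array : List (List (String × Int))) (threshold : List Int) (total : Int) : Decidable (Pre_create_potions ml potion_type result_array threshold total) := by unfold Pre_create_potions; infer_instance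

def pvWitness_create_potions : List Int × List Int × (List (List (String × Int))) × List Int × Int :=
  ([10, 10, 10, 10], [1, 1, 1, 1], [], [2, 2, 2, 2], 295)

def Spec_create_potions (ml : List Int) (potion_type : List Int) (result_array : List (List (String × Int))) (threshold : List Int) (total : Int) (out : Int) : Prop := out = create_potions_alt ml potion_type result_array threshold total
instance (ml : List Int) (potion_type : List Int) (result_array : List (List (String × Int))) (threshold : List Int) (total : Int) (out : Int) : Decidable (Spec_create_potions ml potion_type result_array threshold total out) := by unfold Spec_create_potions; infer_instance

-- ===== CLAIM (what is proved, stated in full; the proofs are below) =====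
def Claim_equal_create_potions : Prop := ∀ (ml : List Int) (potion_type : List Int) (result_array : List (List (String × Int))) (threshold : List Int) (total : Int), Dom_create_potions ml potion_type result_array threshold total → Pre_create_potions ml potion_type result_array threshold total → Spec_create_potions ml potion_type result_array threshold total (create_potions ml potion_type result_array threshold total)

-- ===== LEMMAS AND PROOFS =====

-- per-ingredient limit step of the closed form
def pvStep (p m t l : Int) : Int :=
  if 0 < p then min l (PySem.Int.floordiv (m - t) p + 1) else l

-- closed-form brew count on the four destructured components
def pvN (m0 m1 m2 m3 p0 p1 p2 p3 t0 t1 t2 t3 total : Int) : Int :=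
  if t0 ≤ m0 ∧ t1 ≤ m1 ∧ t2 ≤ m2 ∧ t3 ≤ m3 then
    if pvStep p3 m3 t3 (pvStep p2 m2 t2 (pvStep p1 m1 t1 (pvStep p0 m0 t0 (300 - total)))) ≤ 0 then 0
    else pvStep p3 m3 t3 (pvStep p2 m2 t2 (pvStep p1 m1 t1 (pvStep p0 m0 t0 (300 - total))))
  else 0

lemma pvStep_le (p m t l : Int) : pvStep p m t l ≤ l := by
  unfold pvStep; split_ifs
  · exact min_le_left _ _
  · exact le_rfl

lemma pvStep_ge_one (p m t l : Int) (hmt : t ≤ m) (hl : 1 ≤ l) : 1 ≤ pvStep p m t l := by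
  unfold pvStep; split_ifs with hp
  · have h : 0 ≤ PySem.Int.floordiv (m - t) p := by
      rw [PySem.Int.floordiv_eq_ediv_of_pos hp]
      exact Int.ediv_nonneg (by omega) (by omega)
    generalize PySem.Int.floordiv (m - t) p = d at h ⊢; omega
  · exact hl

lemma pvStep_le_one (p m t l : Int) (hp : 0 < p) (hmt : t ≤ m) (hsmall : m - p < t) :
    pvStep p m t l ≤ 1 := by
  unfold pvStep
  rw [if_pos hp, PySem.Int.floordiv_eq_ediv_of_pos hp,
    Int.ediv_eq_zero_of_lt (by omega) (by omega)]
  omega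

lemma pvStep_shift (p m t l : Int) : pvStep p (m - p) t (l - 1) = pvStep p m t l - 1 := by
  unfold pvStep; split_ifs with hp
  · have h : PySem.Int.floordiv (m - p - t) p = PySem.Int.floordiv (m - t) p - 1 := by
      rw [PySem.Int.floordiv_eq_ediv_of_pos hp, PySem.Int.floordiv_eq_ediv_of_pos hp,
        show m - p - t = (m - t) + (-1) * p by ring,
        Int.add_mul_ediv_right _ _ (by omega : p ≠ 0)]
      ring
    rw [h]; generalize PySem.Int.floordiv (m - t) p = d; omega
  · rfl

lemma pvBrewStep_cons (m0 m1 m2 m3 : Int) (mr : List Int) (p0 p1 p2 p3 : Int) (pr : List Int) :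
    pvBrewStep (m0 :: m1 :: m2 :: m3 :: mr) (p0 :: p1 :: p2 :: p3 :: pr)
      = (m0 - p0) :: (m1 - p1) :: (m2 - p2) :: (m3 - p3) :: mr := by
  rw [pvBrewStep, show PySem.List.pyRange 0 4 1 = [0, 1, 2, 3] from by decide]
  norm_num [pysem, show Int.toNat 2 = 2 from rfl, show Int.toNat 3 = 3 from rfl]

lemma pvCondA_cons (m0 m1 m2 m3 : Int) (mr : List Int) (t0 t1 t2 t3 : Int) (tr : List Int) :
    pvCondA (m0 :: m1 :: m2 :: m3 :: mr) (t0 :: t1 :: t2 :: t3 :: tr)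
      = decide (t0 ≤ m0 ∧ t1 ≤ m1 ∧ t2 ≤ m2 ∧ t3 ≤ m3) := by
  simp [pvCondA, pysem, Bool.and_assoc]

lemma pvAlt_cons (m0 m1 m2 m3 : Int) (mr : List Int) (p0 p1 p2 p3 : Int) (pr : List Int)
    (ra : List (List (String × Int))) (t0 t1 t2 t3 : Int) (tr : List Int) (total : Int) :
    create_potions_alt (m0 :: m1 :: m2 :: m3 :: mr) (p0 :: p1 :: p2 :: p3 :: pr) ra
      (t0 :: t1 :: t2 :: t3 :: tr) total
      = pvN m0 m1 m2 m3 p0 p1 p2 p3 t0 t1 t2 t3 total := by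
  rw [create_potions_alt, show PySem.List.pyRange 0 4 1 = [0, 1, 2, 3] from by decide]
  have hany : (([0, 1, 2, 3] : List Int).any
      (fun i => decide (PySem.List.pyGetD (m0 :: m1 :: m2 :: m3 :: mr) i 0
        < PySem.List.pyGetD (t0 :: t1 :: t2 :: t3 :: tr) i 0)))
      = decide (m0 < t0 ∨ m1 < t1 ∨ m2 < t2 ∨ m3 < t3) := by
    simp only [List.any_cons, List.any_nil]
    norm_num [pysem]
  rw [hany]
  by_cases h : t0 ≤ m0 ∧ t1 ≤ m1 ∧ t2 ≤ m2 ∧ t3 ≤ m3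
  · rw [if_neg (by simpa using by omega : ¬ (decide (m0 < t0 ∨ m1 < t1 ∨ m2 < t2 ∨ m3 < t3) = true))]
    simp only [List.foldl_cons, List.foldl_nil]
    rw [pvN, if_pos h]
    norm_num [pysem, pvStep]
  · rw [if_pos (by simp; omega), pvN, if_neg h]

lemma pvN_stop (m0 m1 m2 m3 p0 p1 p2 p3 t0 t1 t2 t3 total : Int) (ht : ¬ total < 300) :
    pvN m0 m1 m2 m3 p0 p1 p2 p3 t0 t1 t2 t3 total = 0 := by
  have h1 := pvStep_le p0 m0 t0 (300 - total)
  have h2 := pvStep_le p1 m1 t1 (pvStep p0 m0 t0 (300 - total))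
  have h3 := pvStep_le p2 m2 t2 (pvStep p1 m1 t1 (pvStep p0 m0 t0 (300 - total)))
  have h4 := pvStep_le p3 m3 t3 (pvStep p2 m2 t2 (pvStep p1 m1 t1 (pvStep p0 m0 t0 (300 - total))))
  unfold pvN; split_ifs <;> omega

lemma pvN_step (m0 m1 m2 m3 p0 p1 p2 p3 t0 t1 t2 t3 total : Int)
    (h0 : t0 ≤ m0) (h1 : t1 ≤ m1) (h2 : t2 ≤ m2) (h3 : t3 ≤ m3) (ht : total < 300) :
    pvN m0 m1 m2 m3 p0 p1 p2 p3 t0 t1 t2 t3 total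
      = 1 + pvN (m0 - p0) (m1 - p1) (m2 - p2) (m3 - p3) p0 p1 p2 p3 t0 t1 t2 t3 (total + 1) := by
  have hg1 := pvStep_ge_one p0 m0 t0 (300 - total) h0 (by omega)
  have hg2 := pvStep_ge_one p1 m1 t1 _ h1 hg1
  have hg3 := pvStep_ge_one p2 m2 t2 _ h2 hg2
  have hg4 := pvStep_ge_one p3 m3 t3 _ h3 hg3
  have hshift : pvStep p3 (m3 - p3) t3 (pvStep p2 (m2 - p2) t2 (pvStep p1 (m1 - p1) t1
        (pvStep p0 (m0 - p0) t0 (300 - (total + 1)))))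
      = pvStep p3 m3 t3 (pvStep p2 m2 t2 (pvStep p1 m1 t1 (pvStep p0 m0 t0 (300 - total)))) - 1 := by
    rw [show 300 - (total + 1) = (300 - total) - 1 by ring,
      pvStep_shift, pvStep_shift, pvStep_shift, pvStep_shift]
  rw [pvN, pvN, if_pos ⟨h0, h1, h2, h3⟩]
  by_cases hC : t0 ≤ m0 - p0 ∧ t1 ≤ m1 - p1 ∧ t2 ≤ m2 - p2 ∧ t3 ≤ m3 - p3
  · rw [if_pos hC, hshift]; split_ifs <;> omega
  · rw [if_neg hC]
    -- some ingredient allows exactly one more brew: the chain collapses to 1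
    have hle : pvStep p3 m3 t3 (pvStep p2 m2 t2 (pvStep p1 m1 t1 (pvStep p0 m0 t0 (300 - total)))) ≤ 1 := by
      rcases not_and_or.mp hC with hv | h'
      · have hp : 0 < p0 := by by_contra hp; exact hv (by omega)
        calc pvStep p3 m3 t3 (pvStep p2 m2 t2 (pvStep p1 m1 t1 (pvStep p0 m0 t0 (300 - total))))
            ≤ pvStep p0 m0 t0 (300 - total) :=
              le_trans (pvStep_le _ _ _ _) (le_trans (pvStep_le _ _ _ _) (pvStep_le _ _ _ _))
          _ ≤ 1 := pvStep_le_one _ _ _ _ hp h0 (by omega)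
      rcases not_and_or.mp h' with hv | h'
      · have hp : 0 < p1 := by by_contra hp; exact hv (by omega)
        calc pvStep p3 m3 t3 (pvStep p2 m2 t2 (pvStep p1 m1 t1 (pvStep p0 m0 t0 (300 - total))))
            ≤ pvStep p1 m1 t1 (pvStep p0 m0 t0 (300 - total)) :=
              le_trans (pvStep_le _ _ _ _) (pvStep_le _ _ _ _)
          _ ≤ 1 := pvStep_le_one _ _ _ _ hp h1 (by omega)
      rcases not_and_or.mp h' with hv | hv
      · have hp : 0 < p2 := by by_contra hp; exact hv (by omega)
        calc pvStep p3 m3 t3 (pvStep p2 m2 t2 (pvStep p1 m1 t1 (pvStep p0 m0 t0 (300 - total))))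
            ≤ pvStep p2 m2 t2 (pvStep p1 m1 t1 (pvStep p0 m0 t0 (300 - total))) := pvStep_le _ _ _ _
          _ ≤ 1 := pvStep_le_one _ _ _ _ hp h2 (by omega)
      · have hp : 0 < p3 := by by_contra hp; exact hv (by omega)
        exact pvStep_le_one _ _ _ _ hp h3 (by omega)
    split_ifs <;> omega

lemma pvLoopA_eq (p0 p1 p2 p3 t0 t1 t2 t3 : Int) (pr tr : List Int) :
    ∀ (fuel : Nat) (total : Int), (300 - total).toNat = fuel →
      ∀ (m0 m1 m2 m3 : Int) (mr : List Int) (new : Int),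
      pvLoopA (m0 :: m1 :: m2 :: m3 :: mr) (p0 :: p1 :: p2 :: p3 :: pr)
          (t0 :: t1 :: t2 :: t3 :: tr) new total
        = new + pvN m0 m1 m2 m3 p0 p1 p2 p3 t0 t1 t2 t3 total := by
  intro fuel
  induction fuel using Nat.strong_induction_on with
  | _ fuel ih =>
    intro total hft m0 m1 m2 m3 mr new
    rw [pvLoopA, pvCondA_cons]
    by_cases hc : t0 ≤ m0 ∧ t1 ≤ m1 ∧ t2 ≤ m2 ∧ t3 ≤ m3
    · rw [if_pos (by simp [hc])]
      by_cases htl : total < 300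
      · rw [if_pos htl, pvBrewStep_cons,
          ih (300 - (total + 1)).toNat (by omega) (total + 1) rfl,
          pvN_step m0 m1 m2 m3 p0 p1 p2 p3 t0 t1 t2 t3 total hc.1 hc.2.1 hc.2.2.1 hc.2.2.2 htl]
        ring
      · rw [if_neg htl, pvN_stop m0 m1 m2 m3 p0 p1 p2 p3 t0 t1 t2 t3 total htl]
        ring
    · rw [if_neg (by simp [hc]), pvN, if_neg hc]
      ring

lemma pvCondA_false (ml th : List Int) (i : Nat) (hi : i < 4)
    (hlt : ml.getD i 0 < th.getD i 0) : pvCondA ml th = false := by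
  simp only [pvCondA, PySem.List.pyGetD_ofNat', ← Bool.decide_and, decide_eq_false_iff_not]
  rintro ⟨⟨⟨hA, hB⟩, hC⟩, hD⟩
  interval_cases i <;> omega

lemma pvAnyLt_true (ml th : List Int) (i : Nat) (hi : i < 4)
    (hlt : ml.getD i 0 < th.getD i 0) :
    (([0, 1, 2, 3] : List Int).any
      (fun j => decide (PySem.List.pyGetD ml j 0 < PySem.List.pyGetD th j 0))) = true := by
  simp only [List.any_cons, List.any_nil, PySem.List.pyGetD_ofNat', Bool.or_eq_true,
    decide_eq_true_eq, Bool.false_eq_true, or_false]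
  interval_cases i <;> omega

lemma pvLen4 (l : List Int) (h : 4 ≤ l.length) :
    ∃ a b c d r, l = a :: b :: c :: d :: r := by
  match l with
  | a :: b :: c :: d :: r => exact ⟨a, b, c, d, r, rfl⟩
  | [] | [_] | [_, _] | [_, _, _] => simp at h

-- ===== VERDICT (by name: the statement is the Claim_ definition above) =====
theorem create_potions_spec : Claim_equal_create_potions := by
  intro ml pt ra th total _ hpre
  rcases hpre with ⟨hm, hp, ht⟩ | ⟨i, _, him, hit, hlt⟩
  · obtain ⟨m0, m1, m2, m3, mr, rfl⟩ := pvLen4 ml hm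
    obtain ⟨p0, p1, p2, p3, pr, rfl⟩ := pvLen4 pt hp
    obtain ⟨t0, t1, t2, t3, tr, rfl⟩ := pvLen4 th ht
    show create_potions _ _ _ _ _ = _
    rw [create_potions, pvAlt_cons,
      pvLoopA_eq p0 p1 p2 p3 t0 t1 t2 t3 pr tr (300 - total).toNat total rfl]
    ring
  · have hi : i < 4 := by
      simp only [List.mem_cons, List.not_mem_nil, or_false] at *
      omega
    show create_potions _ _ _ _ _ = _
    rw [create_potions, pvLoopA, create_potions_alt,
      show PySem.List.pyRange 0 4 1 = [0, 1, 2, 3] from by decide,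
      pvCondA_false ml th i hi hlt, if_pos (pvAnyLt_true ml th i hi hlt)]
    simp
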